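-- pv_equiv track=rewrite | github.com/Gaurav-Wadhwa/DSAInPython | DSAProblemStatements.py | count_odd_even_occurrences
-- ===== SOURCE A (Python) =====
-- def count_odd_even_occurrences(ARR):
--     my_dict = {}
--     for i in ARR:
--         my_dict[i] = my_dict.get(i, 0) + 1
--     odd = 0
--     even = 0
--     for key, value in my_dict.items():
--         if value % 2 != 0:
--             odd += 1
--         else:
--             even += 1
--     return (odd, even)
-- ===== SOURCE B (Python) =====
-- def count_odd_even_occurrences(ARR):
--     seen = set()
--     odd = set()
--     for x in ARR:
--         seen.add(x)
--         if x in odd: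
--             odd.discard(x)
--         else:
--             odd.add(x)
--     return (len(odd), len(seen) - len(odd))
-- ===== Notes on version B (the rewrite author's own statement) =====
-- stated objective: alternative
-- what changed: Replaces the build-a-count-dict-then-classify-its-values two-loop algorithm by a single pass that maintains parity membership: a 'seen' set and an 'odd' set toggled per element; the answer is (len(odd), len(seen)-len(odd)), so counts are never stored and the second loop disappears.
import Mathlib
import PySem

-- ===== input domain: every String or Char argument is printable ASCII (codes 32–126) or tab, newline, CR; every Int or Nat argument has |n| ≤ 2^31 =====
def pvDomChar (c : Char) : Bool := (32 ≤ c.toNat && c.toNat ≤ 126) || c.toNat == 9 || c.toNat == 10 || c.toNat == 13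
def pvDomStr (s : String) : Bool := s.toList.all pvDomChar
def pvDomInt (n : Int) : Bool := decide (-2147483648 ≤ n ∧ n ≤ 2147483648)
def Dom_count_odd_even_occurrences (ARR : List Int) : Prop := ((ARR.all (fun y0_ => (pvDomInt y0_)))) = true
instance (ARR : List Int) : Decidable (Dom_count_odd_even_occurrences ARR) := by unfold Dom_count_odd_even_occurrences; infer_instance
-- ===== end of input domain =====

-- B replaces A's count-dict-then-classify two loops by one pass maintaining parity membership in two sets (alternative decomposition, same O(n) cost).

-- ===== PORT A =====
def count_odd_even_occurrences (ARR : List Int) : Int × Int :=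
  let my_dict : PySem.Dict Int Int :=
    ARR.foldl (fun d i => d.insert i (d.getD i 0 + 1)) PySem.Dict.empty
  my_dict.items.foldl
    (fun (oe : Int × Int) kv =>
      if PySem.Int.mod kv.2 2 ≠ 0 then (oe.1 + 1, oe.2) else (oe.1, oe.2 + 1))
    (0, 0)

-- ===== PORT B =====
def count_odd_even_occurrences_alt (ARR : List Int) : Int × Int :=
  let st : PySem.Set Int × PySem.Set Int :=
    ARR.foldl
      (fun st x =>
        (PySem.Set.add st.1 x,
         if PySem.Set.contains st.2 x then PySem.Set.discard st.2 x
         else PySem.Set.add st.2 x))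
      (PySem.Set.empty, PySem.Set.empty)
  (PySem.Set.len st.2, PySem.Set.len st.1 - PySem.Set.len st.2)

-- ===== PRECONDITION & SPEC =====
def Spec_count_odd_even_occurrences (ARR : List Int) (out : Int × Int) : Prop := out = count_odd_even_occurrences_alt ARR
instance (ARR : List Int) (out : Int × Int) : Decidable (Spec_count_odd_even_occurrences ARR out) := by unfold Spec_count_odd_even_occurrences; infer_instance

-- ===== CLAIM (what is proved, stated in full; the proofs are below) =====
def Claim_equal_count_odd_even_occurrences : Prop := ∀ (ARR : List Int), Dom_count_odd_even_occurrences ARR → Spec_count_odd_even_occurrences ARR (count_odd_even_occurrences ARR)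

-- ===== LEMMAS AND PROOFS =====

-- A's classification loop counts items with odd/even value.
theorem classify_foldl (items : List (Int × Int)) (a b : Int) :
    items.foldl
      (fun (oe : Int × Int) kv =>
        if PySem.Int.mod kv.2 2 ≠ 0 then (oe.1 + 1, oe.2) else (oe.1, oe.2 + 1))
      (a, b)
    = (a + items.countP (fun kv => decide (PySem.Int.mod kv.2 2 ≠ 0)),
       b + items.countP (fun kv => decide (PySem.Int.mod kv.2 2 = 0))) := by
  induction items generalizing a b with
  | nil => simp
  | cons kv rest ih =>
    rw [List.foldl_cons, List.countP_cons, List.countP_cons]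
    by_cases h : PySem.Int.mod kv.2 2 ≠ 0
    · have h1 : (decide (PySem.Int.mod kv.2 2 ≠ 0)) = true := by simpa using h
      have h2 : (decide (PySem.Int.mod kv.2 2 = 0)) = false := by simpa using h
      rw [if_pos h, ih, h1, h2, Prod.mk.injEq]
      constructor <;> simp <;> omega
    · have h0 : PySem.Int.mod kv.2 2 = 0 := not_ne_iff.mp h
      have h1 : (decide (PySem.Int.mod kv.2 2 ≠ 0)) = false := by simpa using h0
      have h2 : (decide (PySem.Int.mod kv.2 2 = 0)) = true := by simpa using h0
      rw [if_neg h, ih, h1, h2, Prod.mk.injEq]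
      constructor <;> simp <;> omega

-- B's toggle loop: membership in the odd-set is parity of the count so far.
theorem toggle_foldl (l : List Int) (o : PySem.Set Int) (ho : o.Nodup) :
    (l.foldl
        (fun (o : PySem.Set Int) x =>
          if PySem.Set.contains o x then PySem.Set.discard o x else PySem.Set.add o x)
        o).Nodup ∧
    ∀ x, x ∈ l.foldl
        (fun (o : PySem.Set Int) x =>
          if PySem.Set.contains o x then PySem.Set.discard o x else PySem.Set.add o x)
        o
      ↔ ((x ∈ o) ↔ l.count x % 2 = 0) := by
  induction l generalizing o with
  | nil => simpa using ho
  | cons a rest ih =>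
    rw [List.foldl_cons]
    by_cases ha : PySem.Set.contains o a = true
    · have hmem : a ∈ o := (PySem.Set.contains_iff o a).mp ha
      have e : (if PySem.Set.contains o a then PySem.Set.discard o a else PySem.Set.add o a)
          = PySem.Set.discard o a := if_pos ha
      rw [e]
      obtain ⟨hn, hm⟩ := ih (PySem.Set.discard o a) (PySem.Set.nodup_discard o a ho)
      refine ⟨hn, fun x => ?_⟩
      rw [hm x, PySem.Set.mem_discard]
      rcases eq_or_ne x a with rfl | hne
      · simp only [List.count_cons_self, ne_eq, not_true_eq_false, and_false, false_iff,
          hmem, true_iff, iff_true]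
        omega
      · simp [List.count_cons, hne, Ne.symm hne]
    · have hmem : a ∉ o := fun h => ha ((PySem.Set.contains_iff o a).mpr h)
      have e : (if PySem.Set.contains o a then PySem.Set.discard o a else PySem.Set.add o a)
          = PySem.Set.add o a := if_neg ha
      rw [e]
      obtain ⟨hn, hm⟩ := ih (PySem.Set.add o a) (PySem.Set.nodup_add o a ho)
      refine ⟨hn, fun x => ?_⟩
      rw [hm x, PySem.Set.mem_add]
      rcases eq_or_ne x a with rfl | hne
      · simp only [List.count_cons_self, or_true, true_iff, false_iff,
          hmem, true_iff, iff_true]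
        omega
      · simp [List.count_cons, hne, Ne.symm hne]

-- the odd-set's size equals the number of distinct elements of ARR with odd count
theorem odd_set_length (ARR : List Int) :
    (ARR.foldl
        (fun (o : PySem.Set Int) x =>
          if PySem.Set.contains o x then PySem.Set.discard o x else PySem.Set.add o x)
        PySem.Set.empty).length
    = (PySem.Set.ofList ARR).countP (fun k => decide (ARR.count k % 2 = 1)) := by
  obtain ⟨hnd, hmem⟩ := toggle_foldl ARR PySem.Set.empty (by simp [PySem.Set.empty])
  set O := ARR.foldl
      (fun (o : PySem.Set Int) x =>
        if PySem.Set.contains o x then PySem.Set.discard o x else PySem.Set.add o x)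
      PySem.Set.empty with hO
  have hmem' : ∀ x, x ∈ O ↔ x ∈ (PySem.Set.ofList ARR).filter (fun k => decide (ARR.count k % 2 = 1)) := by
    intro x
    rw [hmem x]
    simp only [List.mem_filter, PySem.Set.mem_ofList, PySem.Set.empty, List.not_mem_nil,
      false_iff, decide_eq_true_eq]
    constructor
    · intro h
      have h1 : ARR.count x % 2 = 1 := by omega
      have hpos : 0 < ARR.count x := by omega
      exact ⟨List.count_pos_iff.mp hpos, h1⟩
    · rintro ⟨_, h1⟩; omega
  have hperm : O.Perm ((PySem.Set.ofList ARR).filter (fun k => decide (ARR.count k % 2 = 1))) := by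
    rw [List.perm_ext_iff_of_nodup hnd (List.Nodup.filter _ (PySem.Set.nodup_ofList ARR))]
    exact hmem'
  rw [hperm.length_eq, List.countP_eq_length_filter]

theorem mod2_cast (n : Nat) : PySem.Int.mod (n : Int) 2 = ((n % 2 : Nat) : Int) := by
  exact_mod_cast PySem.Int.mod_natCast n 2

-- ===== VERDICT (by name: the statement is the Claim_ definition above) =====
theorem count_odd_even_occurrences_spec : Claim_equal_count_odd_even_occurrences := by
  intro ARR _
  unfold Spec_count_odd_even_occurrences count_odd_even_occurrences count_odd_even_occurrences_alt
  simp only [PySem.Dict.foldl_insert_getD_add_one_eq_counter,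
    PySem.List.foldl_prod_mk (fun (s : PySem.Set Int) x => PySem.Set.add s x)
      (fun (o : PySem.Set Int) x =>
        if PySem.Set.contains o x then PySem.Set.discard o x else PySem.Set.add o x),
    PySem.Dict.items_counter]
  rw [classify_foldl, List.countP_map, List.countP_map]
  have hp : ((fun kv => decide (PySem.Int.mod kv.2 2 ≠ 0)) ∘
        (fun k => (k, (ARR.count k : Int)))) = fun k => decide (ARR.count k % 2 = 1) := by
    funext k
    simp only [Function.comp_apply, mod2_cast]
    rw [decide_eq_decide]
    omega
  have hq : ((fun kv => decide (PySem.Int.mod kv.2 2 = 0)) ∘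
        (fun k => (k, (ARR.count k : Int)))) =
      fun k => decide ¬((fun k => decide (ARR.count k % 2 = 1)) k = true) := by
    funext k
    simp only [Function.comp_apply, mod2_cast, decide_eq_true_eq]
    rw [decide_eq_decide]
    omega
  rw [hp, hq]
  have hofl : List.foldl (fun (s : PySem.Set Int) x => PySem.Set.add s x) PySem.Set.empty ARR
      = PySem.Set.ofList ARR := (PySem.Set.ofList_eq_foldl ARR).symm
  have hodd := odd_set_length ARR
  have hsum := List.length_eq_countP_add_countP
      (fun k => decide (ARR.count k % 2 = 1)) (l := PySem.Set.ofList ARR)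
  simp only [PySem.Set.len, hofl, hodd, Prod.mk.injEq]
  constructor <;> omega
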